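-- pv_equiv track=rewrite | github.com/nguyenhuyenag/algorithms | py-algorithm/other/subarray_with_sum.py | subarrays_with_sum
-- ===== SOURCE A (Python) =====
-- def subarrays_with_sum(nums, s):
--     result = []
--     current_sum = 0
--     sum_map = {}
--
--     for index, num in enumerate(nums):
--         current_sum += num
--
--         if current_sum == s:
--             result.append(nums[0:index + 1])
--
--         if current_sum - s in sum_map:
--             for start in sum_map[current_sum - s]:
--                 result.append(nums[start + 1:index + 1])
--
--         if current_sum not in sum_map:
--             sum_map[current_sum] = [index]
--         else:
--             sum_map[current_sum].append(index)
--
--     return result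
-- ===== SOURCE B (Python) =====
-- def subarrays_with_sum(nums, s):
--     # Prefix-sum table + plain double loop over (end, start), start increasing.
--     prefix = [0]
--     total = 0
--     for x in nums:
--         total += x
--         prefix.append(total)
--     result = []
--     for end in range(len(nums)):
--         for start in range(end + 1):
--             if prefix[end + 1] - prefix[start] == s:
--                 result.append(nums[start:end + 1])
--     return result
-- ===== Notes on version B (the rewrite author's own statement) =====
-- stated objective: simpler
-- what changed: Replaced the prefix-sum hashmap bookkeeping (dict of index lists, per-step lookups and appends) with a precomputed prefix-sum table and a plain double loop over (end, start) pairs, emitting matching slices in the same order.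
import Mathlib
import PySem

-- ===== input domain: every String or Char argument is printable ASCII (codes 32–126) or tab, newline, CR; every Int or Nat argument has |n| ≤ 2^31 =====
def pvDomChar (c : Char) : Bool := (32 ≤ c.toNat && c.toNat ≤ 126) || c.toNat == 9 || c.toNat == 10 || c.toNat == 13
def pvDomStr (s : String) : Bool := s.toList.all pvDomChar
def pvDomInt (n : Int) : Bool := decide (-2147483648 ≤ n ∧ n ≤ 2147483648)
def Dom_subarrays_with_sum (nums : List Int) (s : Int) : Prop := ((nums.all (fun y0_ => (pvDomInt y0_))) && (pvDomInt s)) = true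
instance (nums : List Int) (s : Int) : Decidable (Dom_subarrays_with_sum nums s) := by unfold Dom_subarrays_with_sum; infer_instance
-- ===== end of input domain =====

-- B replaces A's prefix-sum hashmap bookkeeping by a prefix-sum table with a plain
-- double loop over (end, start); objective: simpler. Both are pure (no argument mutation).

-- ===== PORT A =====
-- loop body of A's 'for index, num in enumerate(nums)': state = (result, current_sum, sum_map)
def pvStepA (nums : List Int) (s : Int)
    (st : List (List Int) × Int × PySem.Dict Int (List Int)) (p : Int × Int) :
    List (List Int) × Int × PySem.Dict Int (List Int) :=
  let index := p.1
  let num := p.2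
  let current_sum := st.2.1 + num
  let result :=
    if current_sum == s then st.1 ++ [PySem.List.slice nums (some 0) (some (index + 1))]
    else st.1
  let result :=
    if st.2.2.contains (current_sum - s) then
      (st.2.2.getD (current_sum - s) []).foldl
        (fun r start => r ++ [PySem.List.slice nums (some (start + 1)) (some (index + 1))]) result
    else result
  let sum_map :=
    if st.2.2.contains current_sum = false then st.2.2.insert current_sum [index]
    else st.2.2.modify current_sum [] (fun l => l ++ [index])  -- sum_map[current_sum].append(index)
  (result, current_sum, sum_map)

def subarrays_with_sum (nums : List Int) (s : Int) : List (List Int) :=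
  ((PySem.List.enumerate nums 0).foldl (pvStepA nums s)
      ([], 0, (PySem.Dict.empty : PySem.Dict Int (List Int)))).1

-- ===== PORT B =====
-- inner 'for start in range(end + 1)' loop of B (pre is the prefix-sum table;
-- all its indices here are in range, so pyGetD with default 0 is exact)
def pvInnerB (nums : List Int) (s : Int) (pre : List Int)
    (result : List (List Int)) (ed : Int) : List (List Int) :=
  (PySem.List.pyRange 0 (ed + 1) 1).foldl
    (fun result st =>
      if PySem.List.pyGetD pre (ed + 1) 0 - PySem.List.pyGetD pre st 0 == s then
        result ++ [PySem.List.slice nums (some st) (some (ed + 1))]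
      else result) result

def subarrays_with_sum_alt (nums : List Int) (s : Int) : List (List Int) :=
  let pre := (nums.foldl (fun acc x => (acc.1 ++ [acc.2 + x], acc.2 + x))
      (([0] : List Int), (0 : Int))).1
  (PySem.List.pyRange 0 (nums.length : Int) 1).foldl (pvInnerB nums s pre) []

-- ===== PRECONDITION & SPEC =====
def Spec_subarrays_with_sum (nums : List Int) (s : Int) (out : List (List Int)) : Prop := out = subarrays_with_sum_alt nums s
instance (nums : List Int) (s : Int) (out : List (List Int)) : Decidable (Spec_subarrays_with_sum nums s out) := by unfold Spec_subarrays_with_sum; infer_instance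

-- ===== CLAIM (what is proved, stated in full; the proofs are below) =====
def Claim_equal_subarrays_with_sum : Prop := ∀ (nums : List Int) (s : Int), Dom_subarrays_with_sum nums s → Spec_subarrays_with_sum nums s (subarrays_with_sum nums s)

-- ===== LEMMAS AND PROOFS =====

def pvPfx (nums : List Int) (i : Nat) : Int := (nums.take i).sum

def pvEmit (nums : List Int) (s : Int) (e : Nat) : List (List Int) :=
  ((List.range (e + 1)).filter (fun st => pvPfx nums (e + 1) - pvPfx nums st == s)).map
    (fun st : Nat => PySem.List.slice nums (some (st : Int)) (some ((e : Int) + 1)))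

def pvMap (nums : List Int) (i : Nat) : PySem.Dict Int (List Int) :=
  ((List.range i).map (fun j => (pvPfx nums (j + 1), (j : Int)))).foldl
    (fun d p => d.modify p.1 [] (fun l => l ++ [p.2])) PySem.Dict.empty

lemma pvPfx_succ (nums : List Int) (i : Nat) (hi : i < nums.length) :
    pvPfx nums (i + 1) = pvPfx nums i + nums[i] := by
  exact List.sum_take_succ nums i hi

lemma pvMap_getD (nums : List Int) (i : Nat) (v : Int) :
    (pvMap nums i).getD v [] =
      ((List.range i).filter (fun j => pvPfx nums (j + 1) == v)).map (fun j : Nat => (j : Int)) := by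
  unfold pvMap
  rw [PySem.Dict.getD_foldl_modify_append]
  simp only [List.filter_map, List.map_map, Function.comp_def]
  induction (List.filter _ (List.range i)) with
  | nil => rfl
  | cons a l ih => simp_all

lemma pvMap_succ (nums : List Int) (i : Nat) :
    pvMap nums (i + 1) = (pvMap nums i).modify (pvPfx nums (i + 1)) [] (fun l => l ++ [(i : Int)]) := by
  unfold pvMap
  rw [List.range_succ, List.map_append, List.foldl_append]
  simp

lemma pvBeq (a b c : Int) : (a - b == c) = (b == a - c) := by
  apply Bool.eq_iff_iff.mpr
  simp only [beq_iff_eq]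
  omega

lemma pvEmit_split (nums : List Int) (s : Int) (i : Nat) :
    pvEmit nums s i =
      (if pvPfx nums (i + 1) == s then [PySem.List.slice nums (some 0) (some ((i : Int) + 1))] else [])
      ++ ((List.range i).filter (fun j => pvPfx nums (j + 1) == pvPfx nums (i + 1) - s)).map
          (fun j : Nat => PySem.List.slice nums (some ((j : Int) + 1)) (some ((i : Int) + 1))) := by
  unfold pvEmit
  rw [List.range_succ_eq_map, List.filter_cons, List.filter_map]
  have hpe : ((fun st => pvPfx nums (i + 1) - pvPfx nums st == s) ∘ Nat.succ) =
      (fun j => pvPfx nums (j + 1) == pvPfx nums (i + 1) - s) := by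
    funext j
    exact pvBeq _ _ _
  rw [hpe]
  have h0 : (pvPfx nums (i + 1) - pvPfx nums 0 == s) = (pvPfx nums (i + 1) == s) := by
    rw [show pvPfx nums 0 = 0 from rfl, sub_zero]
  rw [h0]
  have hmap : ∀ (l : List Nat),
      (l.map Nat.succ).map (fun st : Nat => PySem.List.slice nums (some (st : Int)) (some ((i : Int) + 1))) =
        l.map (fun j : Nat => PySem.List.slice nums (some ((j : Int) + 1)) (some ((i : Int) + 1))) := by
    intro l
    rw [List.map_map]
    apply List.map_congr_left
    intro j _
    simp [Function.comp, Nat.succ_eq_add_one]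
  split_ifs with hc
  · rw [List.map_cons, hmap]
    simp
  · rw [hmap]
    simp

lemma pvMapUpd (nums : List Int) (i : Nat) :
    (if (pvMap nums i).contains (pvPfx nums (i + 1)) = false
     then (pvMap nums i).insert (pvPfx nums (i + 1)) [(i : Int)]
     else (pvMap nums i).modify (pvPfx nums (i + 1)) [] (fun l => l ++ [(i : Int)])) =
      pvMap nums (i + 1) := by
  rw [pvMap_succ]
  by_cases hc : (pvMap nums i).contains (pvPfx nums (i + 1)) = false
  · simp [hc, PySem.Dict.modify, PySem.Dict.getD_of_not_contains _ _ hc]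
  · simp [hc]

lemma pvRes2 (nums : List Int) (s : Int) (i : Nat) (res : List (List Int)) :
    (if (pvMap nums i).contains (pvPfx nums (i + 1) - s) then
        ((pvMap nums i).getD (pvPfx nums (i + 1) - s) []).foldl
          (fun r start => r ++ [PySem.List.slice nums (some (start + 1)) (some ((i : Int) + 1))]) res
      else res) =
      res ++ ((List.range i).filter (fun j => pvPfx nums (j + 1) == pvPfx nums (i + 1) - s)).map
          (fun j : Nat => PySem.List.slice nums (some ((j : Int) + 1)) (some ((i : Int) + 1))) := by
  by_cases hc : (pvMap nums i).contains (pvPfx nums (i + 1) - s) = true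
  case neg =>
    rw [Bool.not_eq_true] at hc
    rw [if_neg (by simp [hc])]
    have h := (pvMap_getD nums i (pvPfx nums (i + 1) - s)).symm
    rw [PySem.Dict.getD_of_not_contains _ _ hc] at h
    rw [List.map_eq_nil_iff.mp h]
    simp
  case pos =>
    rw [if_pos hc, pvMap_getD, PySem.List.foldl_append_singleton_eq_map, List.map_map]
    rfl

lemma pvStepA_eq (nums : List Int) (s : Int) (i : Nat) (hi : i < nums.length)
    (acc : List (List Int)) :
    pvStepA nums s (acc, pvPfx nums i, pvMap nums i) ((i : Int), nums[i]) =
      (acc ++ pvEmit nums s i, pvPfx nums (i + 1), pvMap nums (i + 1)) := by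
  have hcs : pvPfx nums i + nums[i] = pvPfx nums (i + 1) := (pvPfx_succ nums i hi).symm
  unfold pvStepA
  dsimp only
  rw [hcs, pvRes2, pvMapUpd, pvEmit_split]
  split_ifs <;> simp

lemma pvLoopA (nums : List Int) (s : Int) :
    ∀ (t : List Int) (i : Nat) (acc : List (List Int)), nums.drop i = t →
      (PySem.List.enumerate t (i : Int)).foldl (pvStepA nums s) (acc, pvPfx nums i, pvMap nums i) =
        (acc ++ (List.range' i t.length).flatMap (pvEmit nums s),
          pvPfx nums (i + t.length), pvMap nums (i + t.length)) := by
  intro t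
  induction t with
  | nil => intro i acc h; simp [PySem.List.enumerate]
  | cons x t ih =>
    intro i acc h
    have hi : i < nums.length := by
      have := congrArg List.length h
      simp at this
      omega
    have hx : nums[i] = x := by
      have h1 : nums[i]? = some x := by
        rw [← List.head?_drop, h]
        rfl
      simpa [List.getElem?_eq_getElem hi] using h1
    have hd : nums.drop (i + 1) = t := by
      have : nums.drop (i + 1) = (nums.drop i).drop 1 := by
        rw [List.drop_drop]
      rw [this, h]
      rfl
    rw [PySem.List.enumerate_cons, List.foldl_cons, ← hx, pvStepA_eq nums s i hi]
    rw [show (i : Int) + 1 = ((i + 1 : Nat) : Int) by push_cast; ring]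
    rw [ih (i + 1) (acc ++ pvEmit nums s i) hd]
    simp only [List.length_cons]
    rw [List.range'_succ, List.flatMap_cons, ← List.append_assoc,
      show i + 1 + t.length = i + (t.length + 1) by omega]

lemma pvA_eq (nums : List Int) (s : Int) :
    subarrays_with_sum nums s = (List.range nums.length).flatMap (pvEmit nums s) := by
  unfold subarrays_with_sum
  have h0 : (([] : List (List Int)), (0 : Int), (PySem.Dict.empty : PySem.Dict Int (List Int))) =
      (([] : List (List Int)), pvPfx nums 0, pvMap nums 0) := rfl
  rw [h0, show (0 : Int) = ((0 : Nat) : Int) from rfl,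
    pvLoopA nums s nums 0 [] (by simp)]
  simp [List.range_eq_range']

lemma pvScan (ns : List Int) : ∀ (l : List Int) (t : Int),
    ns.foldl (fun acc x => (acc.1 ++ [acc.2 + x], acc.2 + x)) (l, t) =
      (l ++ (List.range ns.length).map (fun i => t + (ns.take (i + 1)).sum), t + ns.sum) := by
  induction ns with
  | nil => intro l t; simp
  | cons x ns ih =>
    intro l t
    rw [List.foldl_cons, ih]
    simp [List.range_succ_eq_map, List.map_map, Function.comp_def, List.take_succ_cons, add_assoc]

lemma pvPre_eq (nums : List Int) :
    (nums.foldl (fun acc x => (acc.1 ++ [acc.2 + x], acc.2 + x)) (([0] : List Int), (0 : Int))).1 =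
      (List.range (nums.length + 1)).map (pvPfx nums) := by
  rw [pvScan]
  simp [List.range_succ_eq_map, List.map_map, Function.comp_def, pvPfx]

lemma pvInnerB_eq (nums : List Int) (s : Int) (e : Nat) (he : e < nums.length)
    (res : List (List Int)) :
    pvInnerB nums s ((List.range (nums.length + 1)).map (pvPfx nums)) res (e : Int) =
      res ++ pvEmit nums s e := by
  unfold pvInnerB
  rw [show (e : Int) + 1 = ((e + 1 : Nat) : Int) by push_cast; ring,
    PySem.List.pyRange_zero_natCast, List.foldl_map]
  rw [PySem.List.foldl_append_if
    (fun st : Nat => PySem.List.pyGetD ((List.range (nums.length + 1)).map (pvPfx nums)) ((e + 1 : Nat) : Int) 0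
      - PySem.List.pyGetD ((List.range (nums.length + 1)).map (pvPfx nums)) (st : Int) 0 == s)
    (fun st : Nat => PySem.List.slice nums (some (st : Int)) (some ((e + 1 : Nat) : Int)))]
  unfold pvEmit
  congr 1
  rw [List.filter_congr (fun st hst => by
    rw [PySem.List.pyGetD_natCast, PySem.List.pyGetD_natCast,
      PySem.List.getD_map_range _ _ _ _ (by omega),
      PySem.List.getD_map_range _ _ _ _ (by have := List.mem_range.mp hst; omega)])]
  apply List.map_congr_left
  intro st _
  norm_cast

lemma pvB_eq (nums : List Int) (s : Int) :
    subarrays_with_sum_alt nums s = (List.range nums.length).flatMap (pvEmit nums s) := by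
  unfold subarrays_with_sum_alt
  dsimp only
  rw [pvPre_eq, PySem.List.pyRange_zero_natCast, List.foldl_map]
  rw [PySem.List.foldl_congr_mem (List.range nums.length)
    (fun res e => pvInnerB nums s ((List.range (nums.length + 1)).map (pvPfx nums)) res (e : Int))
    (fun res e => res ++ pvEmit nums s e) []
    (fun res e hm => pvInnerB_eq nums s e (List.mem_range.mp hm) res)]
  rw [PySem.List.foldl_append_eq_flatMap]
  rfl

-- ===== VERDICT (by name: the statement is the Claim_ definition above) =====
theorem subarrays_with_sum_spec : Claim_equal_subarrays_with_sum := by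
  intro nums s _
  show subarrays_with_sum nums s = subarrays_with_sum_alt nums s
  rw [pvA_eq, pvB_eq]
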